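-- pv_equiv track=rewrite | github.com/635547251/pcr | main.py | get_ch_attend_and_win
-- ===== SOURCE A (Python) =====
-- from collections import defaultdict
--
-- def get_ch_attend_and_win(pcr_team: list[tuple[str]]) -> dict[str, tuple[dict[str, str]]]:
--     '''
--     统计1-4人组合出场率, 胜率
--     :param  pcr_team            数据库查询结果
--     :return ch_attend_and_time  各组合的xy轴字典
--     '''
--     def backtrace(t_list: list[str], output_1: defaultdict[int],
--                   output_2: defaultdict[int], output_3: defaultdict[int],
--                   output_4: defaultdict[int], i=0, res=[]):
--         '''
--         获取所有人物组合
--         '''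
--         if len(res) >= 1:
--             k = "|".join(res)
--             if len(res) == 1:
--                 output_1[k] += 1
--             elif len(res) == 2:
--                 output_2[k] += 1
--             elif len(res) == 3:
--                 output_3[k] += 1
--             else:
--                 output_4[k] += 1
--                 return
--         for j in range(i, len(t_list)):
--             backtrace(t_list, output_1, output_2, output_3,
--                       output_4, j + 1, res + [t_list[j]])
--
--     team = set()
--     # 出场次数
--     ch_1_attend_time, ch_2_attend_time = defaultdict(int), defaultdict(int)
--     ch_3_attend_time, ch_4_attend_time = defaultdict(int), defaultdict(int)
--     # 胜利次数 失败次数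
--     ch_1_win_time, ch_1_lose_time = defaultdict(int), defaultdict(int)
--     ch_2_win_time, ch_2_lose_time = defaultdict(int), defaultdict(int)
--     ch_3_win_time, ch_3_lose_time = defaultdict(int), defaultdict(int)
--     ch_4_win_time, ch_4_lose_time = defaultdict(int), defaultdict(int)
--     for attack_team, defense_team, _, _ in pcr_team:
--         # 统计进攻队
--         if attack_team not in team:
--             team.add(attack_team)
--             backtrace(attack_team.split("|"), ch_1_attend_time, ch_2_attend_time,
--                       ch_3_attend_time, ch_4_attend_time)
--         backtrace(attack_team.split("|"), ch_1_win_time,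
--                   ch_2_win_time, ch_3_win_time, ch_4_win_time)
--         # 统计防守队
--         if defense_team not in team:
--             team.add(defense_team)
--             backtrace(defense_team.split("|"), ch_1_attend_time, ch_2_attend_time,
--                       ch_3_attend_time, ch_4_attend_time)
--         backtrace(defense_team.split("|"), ch_1_lose_time,
--                   ch_2_lose_time, ch_3_lose_time, ch_4_lose_time)
--
--     ch_attend_and_time = {
--         "1": (ch_1_attend_time, ch_1_win_time, ch_1_lose_time),
--         "2": (ch_2_attend_time, ch_2_win_time, ch_2_lose_time),
--         "3": (ch_3_attend_time, ch_3_win_time, ch_3_lose_time),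
--         "4": (ch_4_attend_time, ch_4_win_time, ch_4_lose_time)
--     }
--     return ch_attend_and_time
-- ===== SOURCE B (Python) =====
-- from collections import defaultdict
-- from itertools import combinations
--
--
-- def get_ch_attend_and_win(pcr_team: list[tuple[str]]) -> dict[str, tuple[dict[str, str]]]:
--     '''
--     统计1-4人组合出场率, 胜率 — size-grouped itertools.combinations instead of recursive backtracking
--     '''
--     def tally(members, outputs):
--         # outputs: tuple of four defaultdicts, one per combination size
--         for size in (1, 2, 3, 4):
--             out = outputs[size - 1]
--             for combo in combinations(members, size):
--                 out["|".join(combo)] += 1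
--
--     team = set()
--     attend = tuple(defaultdict(int) for _ in range(4))
--     win = tuple(defaultdict(int) for _ in range(4))
--     lose = tuple(defaultdict(int) for _ in range(4))
--     for attack_team, defense_team, _, _ in pcr_team:
--         if attack_team not in team:
--             team.add(attack_team)
--             tally(attack_team.split("|"), attend)
--         tally(attack_team.split("|"), win)
--         if defense_team not in team:
--             team.add(defense_team)
--             tally(defense_team.split("|"), attend)
--         tally(defense_team.split("|"), lose)
--
--     return {str(i + 1): (attend[i], win[i], lose[i]) for i in range(4)}
-- ===== Notes on version B (the rewrite author's own statement) =====
-- stated objective: idiomatic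
-- what changed: Replaces the hand-written recursive DFS backtracking helper (index-prefix recursion with an early return at depth 4) by the standard-library itertools.combinations, enumerating the 1-4 member combinations size by size; the per-size insertion order and counts are identical, proved equal.
import Mathlib
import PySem

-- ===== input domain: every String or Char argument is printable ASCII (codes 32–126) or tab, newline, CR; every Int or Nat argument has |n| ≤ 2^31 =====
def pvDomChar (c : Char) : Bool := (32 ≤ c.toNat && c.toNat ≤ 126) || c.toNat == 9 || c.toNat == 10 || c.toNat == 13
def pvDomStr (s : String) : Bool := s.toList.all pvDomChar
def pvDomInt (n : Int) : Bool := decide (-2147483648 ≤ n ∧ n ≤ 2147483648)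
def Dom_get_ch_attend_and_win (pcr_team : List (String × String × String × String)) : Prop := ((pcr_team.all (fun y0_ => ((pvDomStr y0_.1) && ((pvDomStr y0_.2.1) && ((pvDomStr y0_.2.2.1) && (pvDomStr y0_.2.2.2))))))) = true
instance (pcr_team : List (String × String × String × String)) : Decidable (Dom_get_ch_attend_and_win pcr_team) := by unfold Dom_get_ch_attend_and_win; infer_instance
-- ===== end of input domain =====

-- B replaces A's recursive DFS backtracking over index prefixes by size-grouped itertools.combinations (idiomatic; same keys, same counts, same insertion order per size).

-- ===== PORT A =====
-- the four defaultdicts one backtrace call mutates (per-size counters of one family)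
abbrev PvSt := PySem.Dict String Int × PySem.Dict String Int × PySem.Dict String Int × PySem.Dict String Int

-- the 'if len(res) >= 1: k = "|".join(res); if/elif/elif/else' increment chain of backtrace
def pvIncAt (s : PvSt) (res : List String) : PvSt :=
  let k := PySem.Str.join "|" res
  if res.length = 1 then (s.1.modify k 0 (· + 1), s.2.1, s.2.2.1, s.2.2.2)
  else if res.length = 2 then (s.1, s.2.1.modify k 0 (· + 1), s.2.2.1, s.2.2.2)
  else if res.length = 3 then (s.1, s.2.1, s.2.2.1.modify k 0 (· + 1), s.2.2.2)
  else (s.1, s.2.1, s.2.2.1, s.2.2.2.modify k 0 (· + 1))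

-- backtrace(t_list, o1, o2, o3, o4, i, res); the 'return' fires exactly when len(res) = 4
def pvBt (t : List String) (s : PvSt) (i : Nat) (res : List String) : PvSt :=
  let s1 := if 1 ≤ res.length then pvIncAt s res else s
  if 4 ≤ res.length then s1
  else (List.range' i (t.length - i)).foldl
    (fun acc j => pvBt t acc (j + 1) (res ++ [PySem.List.pyGetD t (j : Int) ""])) s1
termination_by 4 - res.length
decreasing_by simp [List.length_append]; omega

def get_ch_attend_and_win (pcr_team : List (String × String × String × String)) : List (String × (List (String × Int)) × (List (String × Int)) × (List (String × Int))) :=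
  let e : PvSt := (PySem.Dict.empty, PySem.Dict.empty, PySem.Dict.empty, PySem.Dict.empty)
  let fin := pcr_team.foldl (fun st row =>
    let attack := row.1
    let defense := row.2.1
    let team := st.1; let att := st.2.1; let win := st.2.2.1; let lose := st.2.2.2
    let p1 := if PySem.Set.contains team attack then (team, att)
              else (PySem.Set.add team attack, pvBt ((PySem.Str.split? attack "|").getD []) att 0 [])
    let win := pvBt ((PySem.Str.split? attack "|").getD []) win 0 []
    let p2 := if PySem.Set.contains p1.1 defense then p1
              else (PySem.Set.add p1.1 defense, pvBt ((PySem.Str.split? defense "|").getD []) p1.2 0 [])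
    let lose := pvBt ((PySem.Str.split? defense "|").getD []) lose 0 []
    (p2.1, p2.2, win, lose)) (PySem.Set.empty, e, e, e)
  [("1", (fin.2.1.1.items, fin.2.2.1.1.items, fin.2.2.2.1.items)),
   ("2", (fin.2.1.2.1.items, fin.2.2.1.2.1.items, fin.2.2.2.2.1.items)),
   ("3", (fin.2.1.2.2.1.items, fin.2.2.1.2.2.1.items, fin.2.2.2.2.2.1.items)),
   ("4", (fin.2.1.2.2.2.items, fin.2.2.1.2.2.2.items, fin.2.2.2.2.2.2.items))]

-- ===== PORT B =====
-- 'out = outputs[size-1]; for combo in combinations(members, size): out["|".join(combo)] += 1'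
def pvTallyAt (o : PvSt) (size : Nat) (members : List String) : PvSt :=
  let f := fun (d : PySem.Dict String Int) (c : List String) => d.modify (PySem.Str.join "|" c) 0 (· + 1)
  match size with
  | 1 => ((PySem.List.combinations members 1).foldl f o.1, o.2.1, o.2.2.1, o.2.2.2)
  | 2 => (o.1, (PySem.List.combinations members 2).foldl f o.2.1, o.2.2.1, o.2.2.2)
  | 3 => (o.1, o.2.1, (PySem.List.combinations members 3).foldl f o.2.2.1, o.2.2.2)
  | _ => (o.1, o.2.1, o.2.2.1, (PySem.List.combinations members 4).foldl f o.2.2.2)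

-- 'for size in (1, 2, 3, 4): …'
def pvTally (members : List String) (o : PvSt) : PvSt :=
  [1, 2, 3, 4].foldl (fun o size => pvTallyAt o size members) o

-- outputs[i] for a 4-tuple of dicts, as items
def pvSel (o : PvSt) (i : Int) : List (String × Int) :=
  if i = 0 then o.1.items else if i = 1 then o.2.1.items else if i = 2 then o.2.2.1.items else o.2.2.2.items

def get_ch_attend_and_win_alt (pcr_team : List (String × String × String × String)) : List (String × (List (String × Int)) × (List (String × Int)) × (List (String × Int))) :=
  let e : PvSt := (PySem.Dict.empty, PySem.Dict.empty, PySem.Dict.empty, PySem.Dict.empty)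
  let fin := pcr_team.foldl (fun st row =>
    let attack := row.1
    let defense := row.2.1
    let team := st.1; let att := st.2.1; let win := st.2.2.1; let lose := st.2.2.2
    let p1 := if PySem.Set.contains team attack then (team, att)
              else (PySem.Set.add team attack, pvTally ((PySem.Str.split? attack "|").getD []) att)
    let win := pvTally ((PySem.Str.split? attack "|").getD []) win
    let p2 := if PySem.Set.contains p1.1 defense then p1
              else (PySem.Set.add p1.1 defense, pvTally ((PySem.Str.split? defense "|").getD []) p1.2)
    let lose := pvTally ((PySem.Str.split? defense "|").getD []) lose
    (p2.1, p2.2, win, lose)) (PySem.Set.empty, e, e, e)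
  (PySem.List.pyRange 0 4 1).map (fun i =>
    (PySem.Int.toStr (i + 1), (pvSel fin.2.1 i, pvSel fin.2.2.1 i, pvSel fin.2.2.2 i)))

-- ===== PRECONDITION & SPEC =====
def Spec_get_ch_attend_and_win (pcr_team : List (String × String × String × String)) (out : List (String × (List (String × Int)) × (List (String × Int)) × (List (String × Int)))) : Prop := out = get_ch_attend_and_win_alt pcr_team
instance (pcr_team : List (String × String × String × String)) (out : List (String × (List (String × Int)) × (List (String × Int)) × (List (String × Int)))) : Decidable (Spec_get_ch_attend_and_win pcr_team out) := by unfold Spec_get_ch_attend_and_win; infer_instance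

-- ===== CLAIM (what is proved, stated in full; the proofs are below) =====
def Claim_equal_get_ch_attend_and_win : Prop := ∀ (pcr_team : List (String × String × String × String)), Dom_get_ch_attend_and_win pcr_team → Spec_get_ch_attend_and_win pcr_team (get_ch_attend_and_win pcr_team)

-- ===== LEMMAS AND PROOFS =====

-- DFS preorder of the nonempty res values backtrace visits from suffix xs with depth budget d
def pvPaths : List String → Nat → List (List String)
  | _, 0 => []
  | [], _ + 1 => []
  | x :: xs, d + 1 => ([x] :: (pvPaths xs d).map (x :: ·)) ++ pvPaths xs (d + 1)

lemma pvPaths_len_bounds : ∀ (xs : List String) (d : Nat), ∀ r ∈ pvPaths xs d, 1 ≤ r.length ∧ r.length ≤ d := by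
  intro xs
  induction xs with
  | nil => intro d r hr; cases d <;> simp [pvPaths] at hr
  | cons x xs ih =>
    intro d r hr
    cases d with
    | zero => simp [pvPaths] at hr
    | succ d =>
      simp only [pvPaths, List.mem_append, List.mem_cons, List.mem_map] at hr
      rcases hr with (rfl | ⟨p, hp, rfl⟩) | h
      · simp
      · have := ih d p hp; simp; omega
      · have := ih (d+1) r h; omega


lemma pvPaths_filter : ∀ (xs : List String) (k d : Nat), 1 ≤ k → k ≤ d →
    (pvPaths xs d).filter (fun r => r.length = k) = PySem.List.combinations xs k := by
  intro xs
  induction xs with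
  | nil =>
    intro k d h1 h2
    obtain ⟨k, rfl⟩ : ∃ k', k = k' + 1 := ⟨k - 1, by omega⟩
    cases d with
    | zero => omega
    | succ d => simp [pvPaths, PySem.List.combinations_nil_succ]
  | cons x xs ih =>
    intro k d h1 h2
    obtain ⟨d, rfl⟩ : ∃ d', d = d' + 1 := ⟨d - 1, by omega⟩
    obtain ⟨k, rfl⟩ : ∃ k', k = k' + 1 := ⟨k - 1, by omega⟩
    rw [pvPaths, PySem.List.combinations_cons_succ]
    simp only [List.filter_append, List.filter_cons, List.filter_map]
    cases k with
    | zero =>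
      have hmap : (pvPaths xs d).filter ((fun r => decide (r.length = 1)) ∘ (x :: ·)) = [] := by
        rw [List.filter_eq_nil_iff]
        intro p hp
        have := pvPaths_len_bounds xs d p hp
        simp only [Function.comp, List.length_cons, decide_eq_true_eq]
        omega
      rw [hmap, ih 1 (d+1) (by omega) (by omega)]
      simp [PySem.List.combinations_zero]
    | succ k =>
      have hmap : (pvPaths xs d).filter ((fun r => decide (r.length = k + 2)) ∘ (x :: ·))
          = (pvPaths xs d).filter (fun r => r.length = k + 1) := by
        apply List.filter_congr; intro p hp; simp
      rw [hmap, ih (k+1) d (by omega) (by omega), ih (k+2) (d+1) (by omega) (by omega)]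
      simp

lemma pvBt_loop (n : Nat) : ∀ (t res : List String), res.length + n = 3 →
    ∀ (u : List String) (i : Nat) (s : PvSt), t.drop i = u →
    (List.range' i (t.length - i)).foldl
      (fun acc j => pvBt t acc (j + 1) (res ++ [PySem.List.pyGetD t (j : Int) ""])) s
    = List.foldl pvIncAt s ((pvPaths u (n + 1)).map (res ++ ·)) := by
  induction n with
  | zero =>
    intro t res hres u
    induction u with
    | nil =>
      intro i s hdrop
      have hlen : t.length - i = 0 := by
        have := congrArg List.length hdrop; simp at this; omega
      simp [hlen, pvPaths]
    | cons x rest ihu =>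
      intro i s hdrop
      have hx : t[i]? = some x := by
        have : (t.drop i)[0]? = some x := by rw [hdrop]; rfl
        simpa using this
      have hilt : i < t.length := (List.getElem?_eq_some_iff.mp hx).1
      have hget : PySem.List.pyGetD t (i : Int) "" = x := by
        rw [PySem.List.pyGetD_natCast]
        simp [List.getD, hx]
      have hdrop' : t.drop (i+1) = rest := by
        have : List.drop 1 (t.drop i) = rest := by rw [hdrop]; rfl
        rwa [List.drop_drop] at this
      have hlen : t.length - i = rest.length + 1 := by
        have := congrArg List.length hdrop; simp at this; omega
      rw [hlen, List.range'_succ, List.foldl_cons]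
      have hbt : pvBt t s (i+1) (res ++ [PySem.List.pyGetD t (i : Int) ""]) = pvIncAt s (res ++ [x]) := by
        rw [pvBt, hget]
        rw [show (res ++ [x]).length = 4 by simp; omega]
        norm_num
      rw [hbt]
      have := ihu (i+1) (pvIncAt s (res ++ [x])) hdrop'
      rw [show t.length - (i+1) = rest.length by omega] at this
      rw [this]
      simp [pvPaths]
  | succ m ihn =>
    intro t res hres u
    induction u with
    | nil =>
      intro i s hdrop
      have hlen : t.length - i = 0 := by
        have := congrArg List.length hdrop; simp at this; omega
      simp [hlen, pvPaths]
    | cons x rest ihu =>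
      intro i s hdrop
      have hx : t[i]? = some x := by
        have : (t.drop i)[0]? = some x := by rw [hdrop]; rfl
        simpa using this
      have hilt : i < t.length := (List.getElem?_eq_some_iff.mp hx).1
      have hget : PySem.List.pyGetD t (i : Int) "" = x := by
        rw [PySem.List.pyGetD_natCast]
        simp [List.getD, hx]
      have hdrop' : t.drop (i+1) = rest := by
        have : List.drop 1 (t.drop i) = rest := by rw [hdrop]; rfl
        rwa [List.drop_drop] at this
      have hlen : t.length - i = rest.length + 1 := by
        have := congrArg List.length hdrop; simp at this; omega
      rw [hlen, List.range'_succ, List.foldl_cons]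
      -- the child call: res' = res ++ [x], length ≤ 3, unfold pvBt to emit + loop, then outer IH
      have hbt : pvBt t s (i+1) (res ++ [PySem.List.pyGetD t (i : Int) ""])
          = List.foldl pvIncAt (pvIncAt s (res ++ [x])) ((pvPaths rest (m+1)).map ((res ++ [x]) ++ ·)) := by
        rw [pvBt, hget]
        have h1 : 1 ≤ (res ++ [x]).length := by simp
        have h4 : ¬ 4 ≤ (res ++ [x]).length := by simp; omega
        simp only [h1, if_true, h4, if_false]
        exact ihn t (res ++ [x]) (by simp; omega) rest (i+1) _ hdrop'
      rw [hbt]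
      have := ihu (i+1) (List.foldl pvIncAt (pvIncAt s (res ++ [x])) ((pvPaths rest (m+1)).map ((res ++ [x]) ++ ·))) hdrop'
      rw [show t.length - (i+1) = rest.length by omega] at this
      rw [this]
      -- recombine: paths (x::rest) (m+2) = ([x] :: (paths rest (m+1)).map (x::·)) ++ paths rest (m+2)
      rw [pvPaths]
      simp [List.foldl_append, Function.comp_def, List.map_map, List.append_assoc]


lemma pvFoldl_incAt_split : ∀ (l : List (List String)), (∀ r ∈ l, 1 ≤ r.length ∧ r.length ≤ 4) →
    ∀ (s : PvSt),
    List.foldl pvIncAt s l =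
      (List.foldl (fun d c => d.modify (PySem.Str.join "|" c) 0 (· + 1)) s.1 (l.filter (fun r => r.length = 1)),
       List.foldl (fun d c => d.modify (PySem.Str.join "|" c) 0 (· + 1)) s.2.1 (l.filter (fun r => r.length = 2)),
       List.foldl (fun d c => d.modify (PySem.Str.join "|" c) 0 (· + 1)) s.2.2.1 (l.filter (fun r => r.length = 3)),
       List.foldl (fun d c => d.modify (PySem.Str.join "|" c) 0 (· + 1)) s.2.2.2 (l.filter (fun r => r.length = 4))) := by
  intro l
  induction l with
  | nil => intro _ s; simp
  | cons r l ih =>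
    intro h s
    have hr := h r (by simp)
    have hl : ∀ r ∈ l, 1 ≤ r.length ∧ r.length ≤ 4 := fun r hr => h r (by simp [hr])
    obtain ⟨h1, h2⟩ := hr
    rw [List.foldl_cons, ih hl]
    interval_cases hlen : r.length <;> simp_all [pvIncAt]
-- 'out = outputs[size-1]; for combo in combinations(members, size): out["|".join(combo)] += 1'

lemma pvBt_eq_tally (t : List String) (s : PvSt) : pvBt t s 0 [] = pvTally t s := by
  rw [pvBt]
  rw [if_neg (show ¬(1:Nat) ≤ ([]:List String).length by simp), if_neg (show ¬(4:Nat) ≤ ([]:List String).length by simp)]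
  rw [pvBt_loop 3 t [] rfl t 0 s (by simp)]
  simp only [List.nil_append, List.map_id']
  rw [pvFoldl_incAt_split (pvPaths t 4) (pvPaths_len_bounds t 4) s]
  rw [pvPaths_filter t 1 4 (by omega) (by omega), pvPaths_filter t 2 4 (by omega) (by omega),
      pvPaths_filter t 3 4 (by omega) (by omega), pvPaths_filter t 4 4 (by omega) (by omega)]
  simp [pvTally, pvTallyAt]


lemma pvFormat (fin : PySem.Set String × PvSt × PvSt × PvSt) :
    [("1", (fin.2.1.1.items, fin.2.2.1.1.items, fin.2.2.2.1.items)),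
     ("2", (fin.2.1.2.1.items, fin.2.2.1.2.1.items, fin.2.2.2.2.1.items)),
     ("3", (fin.2.1.2.2.1.items, fin.2.2.1.2.2.1.items, fin.2.2.2.2.2.1.items)),
     ("4", (fin.2.1.2.2.2.items, fin.2.2.1.2.2.2.items, fin.2.2.2.2.2.2.items))]
    = (PySem.List.pyRange 0 4 1).map (fun i =>
        (PySem.Int.toStr (i + 1), (pvSel fin.2.1 i, pvSel fin.2.2.1 i, pvSel fin.2.2.2 i))) := by
  rw [show PySem.List.pyRange 0 4 1 = [0, 1, 2, 3] from by decide]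
  simp only [List.map_cons, List.map_nil, pvSel]
  norm_num
  refine ⟨rfl, rfl, rfl, rfl⟩


-- ===== VERDICT (by name: the statement is the Claim_ definition above) =====
theorem get_ch_attend_and_win_spec : Claim_equal_get_ch_attend_and_win := by
  intro pcr _
  unfold Spec_get_ch_attend_and_win
  unfold get_ch_attend_and_win get_ch_attend_and_win_alt
  simp only [pvBt_eq_tally]
  exact pvFormat _
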